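-- pv_equiv track=rewrite | github.com/DARREN-2000/DockerForge | src/dockerforge/remediation/patcher.py | _find_insert_index
-- ===== SOURCE A (Python) =====
-- def _find_insert_index(lines: list[str]) -> int:
--     for idx, line in enumerate(lines):
--         if line.strip().startswith("COPY "):
--             return idx
--     for idx, line in enumerate(lines):
--         stripped = line.strip()
--         if stripped.startswith("CMD ") or stripped.startswith("ENTRYPOINT "):
--             return idx
--     return len(lines)
-- ===== SOURCE B (Python) =====
-- def _find_insert_index(lines: list[str]) -> int:
--     fallback = None
--     for idx, line in enumerate(lines):
--         stripped = line.strip()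
--         if stripped.startswith("COPY "):
--             return idx
--         if fallback is None and (stripped.startswith("CMD ") or stripped.startswith("ENTRYPOINT ")):
--             fallback = idx
--     return fallback if fallback is not None else len(lines)
-- ===== Notes on version B (the rewrite author's own statement) =====
-- stated objective: alternative
-- what changed: Fused A's two sequential scans into a single enumerate loop that returns at the first COPY line and tracks the first CMD/ENTRYPOINT index in a set-once fallback accumulator.
import Mathlib
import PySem

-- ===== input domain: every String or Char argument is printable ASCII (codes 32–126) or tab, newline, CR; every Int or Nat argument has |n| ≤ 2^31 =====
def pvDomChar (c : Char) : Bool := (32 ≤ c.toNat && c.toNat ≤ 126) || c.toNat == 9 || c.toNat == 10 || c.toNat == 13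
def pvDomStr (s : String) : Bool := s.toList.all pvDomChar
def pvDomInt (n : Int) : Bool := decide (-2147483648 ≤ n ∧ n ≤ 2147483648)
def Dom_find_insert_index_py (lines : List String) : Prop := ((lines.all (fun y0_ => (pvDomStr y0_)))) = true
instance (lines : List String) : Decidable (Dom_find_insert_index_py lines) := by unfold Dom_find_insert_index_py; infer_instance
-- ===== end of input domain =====

-- B fuses A's two passes into one accumulator-tracking scan (objective: alternative decomposition).\n
-- ===== PORT A =====
-- A: first scan for a stripped line starting with "COPY "; failing that, a second
-- scan for "CMD " / "ENTRYPOINT "; else len(lines).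
def fiiIsCopy (l : String) : Bool :=
  PySem.Str.startswith (PySem.Str.strip l) "COPY "

def fiiIsCmdEntry (l : String) : Bool :=
  PySem.Str.startswith (PySem.Str.strip l) "CMD " ||
  PySem.Str.startswith (PySem.Str.strip l) "ENTRYPOINT "

def fiiScanCopy : List String → Nat → Option Nat
  | [], _ => none
  | l :: ls, i => if fiiIsCopy l then some i else fiiScanCopy ls (i + 1)

def fiiScanCmd : List String → Nat → Option Nat
  | [], _ => none
  | l :: ls, i => if fiiIsCmdEntry l then some i else fiiScanCmd ls (i + 1)

def find_insert_index_py (lines : List String) : Int :=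
  match fiiScanCopy lines 0 with
  | some i => (i : Int)
  | none =>
    match fiiScanCmd lines 0 with
    | some i => (i : Int)
    | none => PySem.List.len lines

-- ===== PORT B =====
-- B: one fused scan; returns at the first COPY line, remembers (set once) the first
-- CMD/ENTRYPOINT index as a fallback, returns the fallback or len(lines) at the end.
def fiiLoop : List String → Nat → Option Nat → Option Nat
  | [], _, fallback => fallback
  | l :: ls, i, fallback =>
    if fiiIsCopy l then some i
    else
      fiiLoop ls (i + 1)
        (if fallback = none ∧ fiiIsCmdEntry l = true then some i else fallback)

def find_insert_index_py_alt (lines : List String) : Int :=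
  match fiiLoop lines 0 none with
  | some i => (i : Int)
  | none => PySem.List.len lines

-- ===== PRECONDITION & SPEC =====
def Spec_find_insert_index_py (lines : List String) (out : Int) : Prop := out = find_insert_index_py_alt lines
instance (lines : List String) (out : Int) : Decidable (Spec_find_insert_index_py lines out) := by unfold Spec_find_insert_index_py; infer_instance

-- ===== CLAIM (what is proved, stated in full; the proofs are below) =====
def Claim_equal_find_insert_index_py : Prop := ∀ (lines : List String), Dom_find_insert_index_py lines → Spec_find_insert_index_py lines (find_insert_index_py lines)

-- ===== LEMMAS AND PROOFS =====
theorem fiiLoop_eq (ls : List String) (i : Nat) (fb : Option Nat) :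
    fiiLoop ls i fb = (fiiScanCopy ls i).or (fb.or (fiiScanCmd ls i)) := by
  induction ls generalizing i fb with
  | nil => simp [fiiLoop, fiiScanCopy, fiiScanCmd]
  | cons l ls ih =>
    simp only [fiiLoop, fiiScanCopy, fiiScanCmd]
    by_cases hc : fiiIsCopy l = true
    · simp [hc]
    · simp only [hc, if_false, Bool.false_eq_true, ih]
      cases fb with
      | some j => simp
      | none =>
        by_cases hm : fiiIsCmdEntry l = true
        · simp [hm]
        · simp [hm]

-- ===== VERDICT (by name: the statement is the Claim_ definition above) =====
theorem find_insert_index_py_spec : Claim_equal_find_insert_index_py := by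
  intro lines _
  unfold Spec_find_insert_index_py find_insert_index_py find_insert_index_py_alt
  rw [fiiLoop_eq]
  cases h1 : fiiScanCopy lines 0 <;> cases h2 : fiiScanCmd lines 0 <;> simp
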